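/-
  RESIDUES, second half: the two-address frame lemma of the group `ResidueOK` (`ResidueOK.wins`, `.Reads`, `.Owns`, `.transfer`,
  its instances `.frame` and `.reblk`, and `.owns_blk` / `.reads_blk`), the same for the transient `ResidueUpTo` and for one record
  (`ResidueAtOK.frame` over `ResidueReads`), R9 = H3 (`ResidueDeinitOK`: what vorbis_deinit walks, true at EVERY return of
  start_decoder) with its `transfer`, and the transients of the inner loops of the residue section of start_decoder (R8c:
  `ResBooksUpTo`; R8a / R8b: `RowsUpTo`, `RowBytesFrom`). The vocabulary (`Blk`, `Kept`, `ObjEq`, `ObjSame`) is Vorbis/Blocks.lean.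
-/
import Vorbis.ResidueMapping.Residue
namespace Vorbis
open X86 X86.User Asan

/-! ### Generic: a ∀ below a counter, one more index (every CONTENT loop of the region) -/

/-- Nothing is claimed below 0. -/
theorem Res.forall_lt_zero (P : Nat → Prop) : ∀ i, i < 0 → P i := by
  intro i hi
  omega

/-- **The step of a CONTENT loop**: the clause holds below `n`, the iteration establishes it at `n` ⇒ it holds below `n + 1`. -/
theorem Res.forall_lt_succ {P : Nat → Prop} {n : Nat} (h : ∀ i, i < n → P i) (hn : P n) : ∀ i, i < n + 1 → P i := by
  intro i hi
  by_cases e : i = n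
  · subst e
    exact hn
  · exact h i (by omega)

/-- A store that does not change the clause at the indices below `n` keeps the partial ∀. -/
theorem Res.forall_lt_congr {P P' : Nat → Prop} {n : Nat} (h : ∀ i, i < n → P i) (he : ∀ i, i < n → (P i → P' i)) :
    ∀ i, i < n → P' i :=
  fun i hi => he i hi (h i hi)

/-! ### What a residue record reads, carried over -/

/-- **The window of `*f` that ONE residue record refers to**: `codebook_count`, `codebooks` (`[160, 176)`). -/
def ResidueAtOK.wins : Wins := [(160, 176)]

/-- `ResidueAtOK.wins` in field names (fails when the layout changes). -/
example : ResidueAtOK.wins = [(Off.stb_vorbis.codebook_count, Off.stb_vorbis.floor_count)] := by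
  simp only [ResidueAtOK.wins, voff]

/-- **The windows of `*f` that `ResidueOK` reads**: `codebook_count`, `codebooks` (`[160, 176)`); `residue_count`,
`residue_types[64]`, `residue_config` (`[320, 464)`). Also the windows of R9 (`ResidueDeinitOK`). -/
def ResidueOK.wins : Wins := [(160, 176), (320, 464)]

/-- `ResidueOK.wins` in field names (fails when the layout changes). -/
example : ResidueOK.wins = [(Off.stb_vorbis.codebook_count, Off.stb_vorbis.floor_count),
    (Off.stb_vorbis.residue_count, Off.stb_vorbis.mapping_count)] := by
  simp only [ResidueOK.wins, voff]

/-- **The windows of `*f` that `ResidueUpTo … n` reads**: as `ResidueOK.wins`, but of `residue_types[64]` only the entries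
below the counter: `[160, 176)`, `[320, 324 + 2n)`, `[456, 464)`. So the store `f->residue_types[n] = get_bits(f, 16)` at the
head of iteration `n` of the residue loop keeps them (`ResidueUpTo.transfer_below`). -/
def ResidueUpTo.wins (n : Nat) : Wins := [(160, 176), (320, 324 + 2 * n), (456, 464)]

/-- `ResidueUpTo.wins` in field names (fails when the layout changes). -/
example (n : Nat) : ResidueUpTo.wins n = [(Off.stb_vorbis.codebook_count, Off.stb_vorbis.floor_count),
    (Off.stb_vorbis.residue_count, Off.stb_vorbis.residue_types + Off.stb_vorbis.residue_types.elem * n),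
    (Off.stb_vorbis.residue_config, Off.stb_vorbis.mapping_count)] := by
  simp only [ResidueUpTo.wins, voff]

/-- The codebook window is one of `ResidueUpTo.wins n`. -/
theorem ResidueUpTo.wins_cb (n : Nat) : (160, 176) ∈ ResidueUpTo.wins n := List.Mem.head _

/-- The window `residue_count`, `residue_types[0 .. n)` is one of `ResidueUpTo.wins n`. -/
theorem ResidueUpTo.wins_types (n : Nat) : (320, 324 + 2 * n) ∈ ResidueUpTo.wins n := List.Mem.tail _ (List.Mem.head _)

/-- The window `residue_config` is one of `ResidueUpTo.wins n`. -/
theorem ResidueUpTo.wins_config (n : Nat) : (456, 464) ∈ ResidueUpTo.wins n :=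
  List.Mem.tail _ (List.Mem.tail _ (List.Mem.head _))

/-- The windows below a counter `n ≤ 64` lie inside `ResidueOK.wins`: `he.sub (ResidueUpTo.wins_sub hn)`. -/
theorem ResidueUpTo.wins_sub {n : Nat} (hn : n ≤ 64) : WinsSub (ResidueUpTo.wins n) ResidueOK.wins := by
  intro w hw
  simp only [ResidueUpTo.wins, List.mem_cons, List.mem_nil_iff, or_false] at hw
  rcases hw with rfl | rfl | rfl
  · exact ⟨(160, 176), by decide, Nat.le_refl _, Nat.le_refl _⟩
  · refine ⟨(320, 464), by decide, Nat.le_refl _, ?_⟩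
    show 324 + 2 * n ≤ 464
    omega
  · refine ⟨(320, 464), by decide, ?_, Nat.le_refl _⟩
    show 320 ≤ 456
    omega

/-- The window of one record lies inside the windows below any counter. -/
theorem ResidueUpTo.wins_sub_at (n : Nat) : WinsSub ResidueAtOK.wins (ResidueUpTo.wins n) := by
  intro w hw
  simp only [ResidueAtOK.wins, List.mem_cons, List.mem_nil_iff, or_false] at hw
  subst hw
  exact ⟨(160, 176), ResidueUpTo.wins_cb n, Nat.le_refl _, Nat.le_refl _⟩

/-- **The reads of the record at `r`, of the two fields of the decoder object it refers to, and of its class book's header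
are the same in `(mem', f)` as in `(mem, p)`.** The record itself does not move; the decoder object may (`*f = p`): only
`codebook_count` and `codebooks` are read through it. Produced by `ResidueReads.of_kept`; consumed by the frame lemmas. -/
structure ResidueReads (mem : Mem) (p : Nat) (mem' : Mem) (f r : Nat) : Prop where
  begin : Residue.begin mem' r = Residue.begin mem r
  end_ : Residue.end_ mem' r = Residue.end_ mem r
  part_size : Residue.part_size mem' r = Residue.part_size mem r
  classifications : Residue.classifications mem' r = Residue.classifications mem r
  classbook : Residue.classbook mem' r = Residue.classbook mem r
  classdata : Residue.classdata mem' r = Residue.classdata mem r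
  residue_books : Residue.residue_books mem' r = Residue.residue_books mem r
  codebook_count : stb_vorbis.codebook_count mem' f = stb_vorbis.codebook_count mem p
  cbk : Residue.cbk mem' f r = Residue.cbk mem p r
  E : Residue.E mem' f r = Residue.E mem p r
  W : Residue.W mem' f r = Residue.W mem p r

/-- The record's 32 bytes and the first 8 bytes of the class book (`dimensions`, `entries`) are kept, the two codebook fields
of the decoder object read the same (`he`; from `ObjSame` / `DecodeSame` / a `Move`: `.sub (by decide)`) ⇒ all the reads are
the same. -/
theorem ResidueReads.of_kept {mem mem' : Mem} {p f r : Nat} (he : ObjEq ResidueAtOK.wins mem p mem' f)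
    (hr : (Block.mk r Off.sizeof.Residue).Kept mem mem') (hcbk : (Block.mk (Residue.cbk mem p r) 8).Kept mem mem') :
    ResidueReads mem p mem' f r := by
  have e1 : Residue.begin mem' r = Residue.begin mem r := by
    simp only [vacc, voff]
    exact hr.u32 _ (by simp only []; omega) (by simp only [voff]; omega)
  have e2 : Residue.end_ mem' r = Residue.end_ mem r := by
    simp only [vacc, voff]
    exact hr.u32 _ (by simp only []; omega) (by simp only [voff]; omega)
  have e3 : Residue.part_size mem' r = Residue.part_size mem r := by
    simp only [vacc, voff]
    exact hr.u32 _ (by simp only []; omega) (by simp only [voff]; omega)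
  have e4 : Residue.classifications mem' r = Residue.classifications mem r := by
    simp only [vacc, voff]
    exact hr.u8 _ (by simp only []; omega) (by simp only [voff]; omega)
  have e5 : Residue.classbook mem' r = Residue.classbook mem r := by
    simp only [vacc, voff]
    exact hr.u8 _ (by simp only []; omega) (by simp only [voff]; omega)
  have e6 : Residue.classdata mem' r = Residue.classdata mem r := by
    simp only [vacc, voff]
    exact hr.u64 _ (by simp only []; omega) (by simp only [voff]; omega)
  have e7 : Residue.residue_books mem' r = Residue.residue_books mem r := by
    simp only [vacc, voff]
    exact hr.u64 _ (by simp only []; omega) (by simp only [voff]; omega)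
  have e8 : stb_vorbis.codebook_count mem' f = stb_vorbis.codebook_count mem p := by
    simp only [vacc, voff]
    exact he.i32 160 (by decide)
  have e9 : stb_vorbis.codebooks mem' f = stb_vorbis.codebooks mem p := by
    simp only [vacc, voff]
    exact he.u64 168 (by decide)
  have e10 : Residue.cbk mem' f r = Residue.cbk mem p r := by
    unfold Residue.cbk stb_vorbis.codebooks_at
    rw [e5, e9]
  have e11 : Residue.E mem' f r = Residue.E mem p r := by
    unfold Residue.E
    rw [e10]
    simp only [Codebook.entries, voff]
    rw [hcbk.i32 _ (by simp only []; omega) (by simp only []; omega)]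
  have e12 : Residue.W mem' f r = Residue.W mem p r := by
    unfold Residue.W
    rw [e10]
    simp only [Codebook.dimensions, voff]
    rw [hcbk.i32 _ (by simp only []; omega) (by simp only []; omega)]
  exact ⟨e1, e2, e3, e4, e5, e6, e7, e8, e10, e11, e12⟩

/-! ### FRAME of one record -/

/-- **The blocks that the record at `r` owns** (and whose content its clauses read): `residue_books`, `classdata`, and the
rows of `classdata`. -/
inductive ResidueAtOK.Owns (mem : Mem) (f r : Nat) : Block → Prop
  /-- `Block(residue_books, 16·classifications)` (R8) -/
  | books : ResidueAtOK.Owns mem f r ⟨Residue.residue_books mem r, 16 * Residue.classifications mem r⟩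
  /-- `Block(classdata, 8·E)` (R8a) -/
  | classdata : ResidueAtOK.Owns mem f r ⟨Residue.classdata mem r, 8 * Residue.E mem f r⟩
  /-- `Block(classdata[q], W)`, `q < E` (R8a) -/
  | row (q : Nat) (hq : q < Residue.E mem f r) : ResidueAtOK.Owns mem f r ⟨Residue.row mem r q, Residue.W mem f r⟩

/-- The value `residue_books[j][k]` is kept when the reads and the `residue_books` block are. -/
theorem Residue.book_kept {mem mem' : Mem} {p f r : Nat} (hrd : ResidueReads mem p mem' f r)
    (hb : (Block.mk (Residue.residue_books mem r) (16 * Residue.classifications mem r)).Kept mem mem') {j k : Nat}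
    (hj : j < Residue.classifications mem r) (hk : k < 8) : Residue.book mem' r j k = Residue.book mem r j k := by
  unfold Residue.book
  rw [hrd.residue_books]
  exact hb.i16 _ (by simp only []; omega) (by simp only []; omega)

/-- The row pointer `classdata[q]` is kept when the reads and the `classdata` block are. -/
theorem Residue.row_kept {mem mem' : Mem} {p f r : Nat} (hrd : ResidueReads mem p mem' f r)
    (hcd : (Block.mk (Residue.classdata mem r) (8 * Residue.E mem p r)).Kept mem mem') {q : Nat}
    (hq : q < Residue.E mem p r) : Residue.row mem' r q = Residue.row mem r q := by
  unfold Residue.row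
  rw [hrd.classdata]
  exact hcd.ptr _ (by simp only []; omega) (by simp only []; omega)

/-- **FRAME of R4–R8b for one record** (the record at `r` does not move; the decoder object may: `p` before, `f` after): what
the record reads is the same (`ResidueReads.of_kept`), every block it owns is kept (`hk`) and still allocated (`hB`) ⇒ the
clauses hold in `mem'`. -/
theorem ResidueAtOK.frame {Blk Blk' : Block → Prop} {mem mem' : Mem} {p f r : Nat} (h : ResidueAtOK Blk mem p r)
    (hrd : ResidueReads mem p mem' f r) (hk : ∀ B, ResidueAtOK.Owns mem p r B → B.Kept mem mem')
    (hB : ∀ B, ResidueAtOK.Owns mem p r B → Blk B → Blk' B) : ResidueAtOK Blk' mem' f r := by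
  have hb := hk _ ResidueAtOK.Owns.books
  have hcd := hk _ ResidueAtOK.Owns.classdata
  constructor
  · rw [hrd.begin, hrd.end_]
    exact h.R4
  · rw [hrd.part_size]
    exact h.R5
  · rw [hrd.classifications]
    exact h.R6
  · rw [hrd.classbook, hrd.codebook_count]
    exact h.R7
  · rw [hrd.W]
    exact h.R7b
  · rw [hrd.residue_books, hrd.classifications]
    exact hB _ ResidueAtOK.Owns.books h.R8
  · intro j k hj hk8
    rw [hrd.classifications] at hj
    rw [Residue.book_kept hrd hb hj hk8, hrd.codebook_count]
    exact h.R8c j k hj hk8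
  · rw [hrd.classdata, hrd.E]
    exact hB _ ResidueAtOK.Owns.classdata h.R8a
  · intro q hq
    rw [hrd.E] at hq
    rw [Residue.row_kept hrd hcd hq, hrd.W]
    exact hB _ (ResidueAtOK.Owns.row q hq) (h.R8a_row q hq)
  · intro q k hq hkW
    rw [hrd.E] at hq
    rw [hrd.W] at hkW
    have hrow := hk _ (ResidueAtOK.Owns.row q hq)
    rw [Residue.row_kept hrd hcd hq, hrd.classifications, hrow.u8 _ (by simp only []; omega) (by simp only []; omega)]
    exact h.R8b q k hq hkW

/-- A row pointer stays a row pointer (two addresses of the decoder object, as `ResidueAtOK.frame`). -/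
theorem RowPtr.frame {mem mem' : Mem} {p f r v : Nat} (hv : RowPtr mem p r v) (hrd : ResidueReads mem p mem' f r)
    (hcd : (Block.mk (Residue.classdata mem r) (8 * Residue.E mem p r)).Kept mem mem') : RowPtr mem' f r v := by
  obtain ⟨q, hq, e⟩ := hv
  refine ⟨q, ?_, ?_⟩
  · rw [hrd.E]
    exact hq
  · rw [Residue.row_kept hrd hcd hq]
    exact e

/-! ### FRAME of all records: `Owns`, `Reads`, `transfer` -/

/-- **The blocks that `ResidueUpTo … n` owns**: `residue_config` and what the records below `n` own. -/
inductive ResidueUpTo.Owns (mem : Mem) (f n : Nat) : Block → Prop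
  /-- `Block(residue_config, 32·residue_count)` (R2) -/
  | config : ResidueUpTo.Owns mem f n
      ⟨stb_vorbis.residue_config mem f, Off.sizeof.Residue * (stb_vorbis.residue_count mem f).toNat⟩
  /-- the blocks of record `i < n` -/
  | record (i : Nat) (hi : i < n) (B : Block) (hB : ResidueAtOK.Owns mem f (stb_vorbis.residue_config_at mem f i) B) :
      ResidueUpTo.Owns mem f n B

/-- **The blocks whose CONTENT `ResidueUpTo … n` reads**: the blocks it owns, and the codebooks block
`⟨codebooks, 2120·codebook_count⟩`, where `dimensions` / `entries` of the class books are read (R7b, R8a, R8b); that block is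
OWNED by the codebook group (CB0), not by this one. -/
inductive ResidueUpTo.Reads (mem : Mem) (f n : Nat) : Block → Prop
  /-- an owned block -/
  | owns {B : Block} (h : ResidueUpTo.Owns mem f n B) : ResidueUpTo.Reads mem f n B
  /-- CB0's block -/
  | codebooks : ResidueUpTo.Reads mem f n
      ⟨stb_vorbis.codebooks mem f, Off.sizeof.Codebook * (stb_vorbis.codebook_count mem f).toNat⟩

/-- **The blocks that `ResidueOK` owns**: `residue_config`, and per record `residue_books`, `classdata`, its rows. -/
def ResidueOK.Owns (mem : Mem) (f : Nat) : Block → Prop :=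
  ResidueUpTo.Owns mem f (stb_vorbis.residue_count mem f).toNat

/-- **The blocks whose CONTENT `ResidueOK` reads**: the blocks it owns, and CB0's codebooks block. -/
def ResidueOK.Reads (mem : Mem) (f : Nat) : Block → Prop :=
  ResidueUpTo.Reads mem f (stb_vorbis.residue_count mem f).toNat

/-- `ResidueOK` owns `residue_config`. -/
theorem ResidueOK.Owns.config {mem : Mem} {f : Nat} : ResidueOK.Owns mem f
    ⟨stb_vorbis.residue_config mem f, Off.sizeof.Residue * (stb_vorbis.residue_count mem f).toNat⟩ :=
  ResidueUpTo.Owns.config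

/-- `ResidueOK` owns the blocks of every record `i < residue_count`. -/
theorem ResidueOK.Owns.record {mem : Mem} {f : Nat} (i : Nat) (hi : (i : Int) < stb_vorbis.residue_count mem f) (B : Block)
    (hB : ResidueAtOK.Owns mem f (stb_vorbis.residue_config_at mem f i) B) : ResidueOK.Owns mem f B :=
  ResidueUpTo.Owns.record i (by omega) B hB

/-- `ResidueOK` reads the blocks it owns. -/
theorem ResidueOK.Reads.owns {mem : Mem} {f : Nat} {B : Block} (h : ResidueOK.Owns mem f B) : ResidueOK.Reads mem f B :=
  ResidueUpTo.Reads.owns h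

/-- `ResidueOK` reads CB0's codebooks block. -/
theorem ResidueOK.Reads.codebooks {mem : Mem} {f : Nat} : ResidueOK.Reads mem f
    ⟨stb_vorbis.codebooks mem f, Off.sizeof.Codebook * (stb_vorbis.codebook_count mem f).toNat⟩ :=
  ResidueUpTo.Reads.codebooks

/-- A smaller counter owns less. -/
theorem ResidueUpTo.Owns.mono {mem : Mem} {f n m : Nat} {B : Block} (h : ResidueUpTo.Owns mem f m B) (hm : m ≤ n) :
    ResidueUpTo.Owns mem f n B := by
  cases h with
  | config => exact ResidueUpTo.Owns.config
  | record i hi B hB => exact ResidueUpTo.Owns.record i (by omega) B hB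

/-- A smaller counter reads less. -/
theorem ResidueUpTo.Reads.mono {mem : Mem} {f n m : Nat} {B : Block} (h : ResidueUpTo.Reads mem f m B) (hm : m ≤ n) :
    ResidueUpTo.Reads mem f n B := by
  cases h with
  | owns hO => exact ResidueUpTo.Reads.owns (hO.mono hm)
  | codebooks => exact ResidueUpTo.Reads.codebooks

/-- **The two-address frame lemma of `ResidueUpTo`, fine form** (hence of the loop invariant RES(i)): the windows
`ResidueUpTo.wins n` of the object at `f` in `mem'` read as those of the object at `p` in `mem` (so a store to
`residue_types[i']`, `i' ≥ n`, is allowed), every block whose content is read is kept, every owned block is still allocated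
⇒ the structure holds of `(mem', f)`. -/
theorem ResidueUpTo.transfer_below {Blk Blk' : Block → Prop} {mem mem' : Mem} {p f n : Nat} (h : ResidueUpTo Blk mem p n)
    (he : ObjEq (ResidueUpTo.wins n) mem p mem' f) (hk : ∀ B, ResidueUpTo.Reads mem p n B → B.Kept mem mem')
    (hB : ∀ B, ResidueUpTo.Owns mem p n B → Blk B → Blk' B) : ResidueUpTo Blk' mem' f n := by
  have ecount : stb_vorbis.residue_count mem' f = stb_vorbis.residue_count mem p := by
    simp only [vacc, voff]
    apply he.i32 320
    apply InWins.of_mem _ (ResidueUpTo.wins_types n)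
    · exact Nat.le_refl _
    · show 320 + 4 ≤ 324 + 2 * n
      omega
  have econf : stb_vorbis.residue_config mem' f = stb_vorbis.residue_config mem p := by
    simp only [vacc, voff]
    exact he.u64 456 (InWins.of_mem _ (ResidueUpTo.wins_config n) (Nat.le_refl _) (Nat.le_refl _))
  have eat : ∀ i, stb_vorbis.residue_config_at mem' f i = stb_vorbis.residue_config_at mem p i := by
    intro i
    unfold stb_vorbis.residue_config_at
    rw [econf]
  have hconf := hk _ (ResidueUpTo.Reads.owns ResidueUpTo.Owns.config)
  have hcb := hk _ ResidueUpTo.Reads.codebooks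
  have h1 := h.R1
  have hle := h.n_le
  refine ⟨?_, ?_, ?_, ?_, ?_⟩
  · rw [ecount]
    exact h.n_le
  · rw [ecount]
    exact h.R1
  · rw [ecount, econf]
    exact hB _ ResidueUpTo.Owns.config h.R2
  · intro i hi
    have e : stb_vorbis.residue_types mem' f i = stb_vorbis.residue_types mem p i := by
      simp only [vacc, voff]
      have hw : InWins (ResidueUpTo.wins n) (324 + 2 * i) 2 := by
        apply InWins.of_mem _ (ResidueUpTo.wins_types n)
        · show 320 ≤ 324 + 2 * i
          omega
        · show 324 + 2 * i + 2 ≤ 324 + 2 * n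
          omega
      exact he.u16_at (324 + 2 * i) hw (by omega) (by omega)
    rw [e]
    exact h.R3 i hi
  · intro i hi
    rw [eat i]
    have hrec := h.record i hi
    have h7 := hrec.R7
    -- the record's 32 bytes: a part of the config block
    have hr : (Block.mk (stb_vorbis.residue_config_at mem p i) Off.sizeof.Residue).Kept mem mem' := by
      apply hconf.mono
      · simp only [vacc, voff]
        omega
      · simp only [vacc, voff] at h1 hle ⊢
        omega
    -- the class book's header: a part of the codebooks block
    have hcbk : (Block.mk (Residue.cbk mem p (stb_vorbis.residue_config_at mem p i)) 8).Kept mem mem' := by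
      apply hcb.mono
      · simp only [vacc, voff]
        omega
      · simp only [vacc, voff] at h7 ⊢
        omega
    have hrd := ResidueReads.of_kept (he.sub (ResidueUpTo.wins_sub_at n)) hr hcbk
    apply hrec.frame hrd
    · intro B hO
      exact hk B (ResidueUpTo.Reads.owns (ResidueUpTo.Owns.record i hi B hO))
    · intro B hO
      exact hB B (ResidueUpTo.Owns.record i hi B hO)

/-- **The two-address frame lemma of `ResidueUpTo`** over the windows of the group (`ResidueOK.wins`). -/
theorem ResidueUpTo.transfer {Blk Blk' : Block → Prop} {mem mem' : Mem} {p f n : Nat} (h : ResidueUpTo Blk mem p n)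
    (he : ObjEq ResidueOK.wins mem p mem' f) (hk : ∀ B, ResidueUpTo.Reads mem p n B → B.Kept mem mem')
    (hB : ∀ B, ResidueUpTo.Owns mem p n B → Blk B → Blk' B) : ResidueUpTo Blk' mem' f n := by
  have h1 := h.R1
  have hle := h.n_le
  exact h.transfer_below (he.sub (ResidueUpTo.wins_sub (by omega))) hk hB

/-- **FRAME of `ResidueUpTo`** (same address, same block predicate): `ObjSame` is what every allocator call and every store
outside `*f` leaves of the object. -/
theorem ResidueUpTo.frame {Blk : Block → Prop} {mem mem' : Mem} {f n : Nat} (h : ResidueUpTo Blk mem f n)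
    (hs : ObjSame f mem mem') (hk : ∀ B, ResidueUpTo.Reads mem f n B → B.Kept mem mem') : ResidueUpTo Blk mem' f n :=
  h.transfer (hs.sub (by decide)) hk (fun _ _ hb => hb)

/-- **THE TWO-ADDRESS FRAME LEMMA OF THE GROUP `ResidueOK`** (Vorbis/Blocks.lean §5): the windows `ResidueOK.wins` of the
object at `f` in `mem'` read as those of the object at `p` in `mem`; the blocks whose content the clauses read — the owned
ones and CB0's codebooks block — are kept; the owned blocks are still allocated. FRAME is `p = f` (`ResidueOK.frame`),
TRANSPORT over `*f = p` is `he := ObjEq.of_copied hcp (by decide)` / `hm.objEq (by decide)`, a change of the block predicate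
alone is `ResidueOK.reblk`. -/
theorem ResidueOK.transfer {Blk Blk' : Block → Prop} {mem mem' : Mem} {p f : Nat} (h : ResidueOK Blk mem p)
    (he : ObjEq ResidueOK.wins mem p mem' f) (hk : ∀ B, ResidueOK.Reads mem p B → B.Kept mem mem')
    (hB : ∀ B, ResidueOK.Owns mem p B → Blk B → Blk' B) : ResidueOK Blk' mem' f := by
  have hu := h.toUpTo.transfer he hk hB
  have ecount : stb_vorbis.residue_count mem' f = stb_vorbis.residue_count mem p := by
    simp only [vacc, voff]
    exact he.i32 320 (by decide)
  have h1 := h.R1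
  exact hu.toOK (by rw [ecount]; omega)

/-- **FRAME of `ResidueOK`** (same address, same block predicate), from `ObjSame`: what every allocator call and every store
outside `*f` leaves of the object (start_decoder's later sections). On the decode path, where `*f` itself is stored to, use
`transfer` with `hs.sub (by decide)` for `hs : DecodeSame f mem mem'`: nothing there writes the configuration. -/
theorem ResidueOK.frame {Blk : Block → Prop} {mem mem' : Mem} {f : Nat} (h : ResidueOK Blk mem f)
    (hs : ObjSame f mem mem') (hk : ∀ B, ResidueOK.Reads mem f B → B.Kept mem mem') : ResidueOK Blk mem' f :=
  h.transfer (hs.sub (by decide)) hk (fun _ _ hb => hb)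

/-- Every owned block is allocated. -/
theorem ResidueOK.owns_blk {Blk : Block → Prop} {mem : Mem} {f : Nat} {B : Block} (h : ResidueOK Blk mem f)
    (hO : ResidueOK.Owns mem f B) : Blk B := by
  have hu := h.toUpTo
  cases hO with
  | config => exact h.R2
  | record i hi B hB =>
    have hrec := hu.record i hi
    cases hB with
    | books => exact hrec.R8
    | classdata => exact hrec.R8a
    | row q hq => exact hrec.R8a_row q hq

/-- Every block whose content is read is allocated, given CB0's block (owned by the codebook group). -/
theorem ResidueOK.reads_blk {Blk : Block → Prop} {mem : Mem} {f : Nat} {B : Block} (h : ResidueOK Blk mem f)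
    (hcb : Blk ⟨stb_vorbis.codebooks mem f, Off.sizeof.Codebook * (stb_vorbis.codebook_count mem f).toNat⟩)
    (hR : ResidueOK.Reads mem f B) : Blk B := by
  cases hR with
  | owns hO => exact h.owns_blk hO
  | codebooks => exact hcb

/-- **Nothing changed in memory, only the notion of allocated block** (a temp block was freed, a frame popped, the arena
grew): the instance `mem' = mem`, `p = f` of `transfer`, proved directly (no no-wrap hypothesis needed). -/
theorem ResidueOK.reblk {Blk Blk' : Block → Prop} {mem : Mem} {f : Nat} (h : ResidueOK Blk mem f)
    (hB : ∀ B, ResidueOK.Owns mem f B → Blk B → Blk' B) : ResidueOK Blk' mem f := by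
  refine ⟨h.R1, hB _ ResidueOK.Owns.config h.R2, h.R3, ?_⟩
  intro i hi
  have hrec := h.record i hi
  have hO : ∀ B, ResidueAtOK.Owns mem f (stb_vorbis.residue_config_at mem f i) B → Blk' B := by
    intro B hBo
    have hO' : ResidueOK.Owns mem f B := ResidueOK.Owns.record i hi B hBo
    exact hB B hO' (h.owns_blk hO')
  exact ⟨hrec.R4, hrec.R5, hrec.R6, hrec.R7, hrec.R7b, hO _ ResidueAtOK.Owns.books, hrec.R8c,
    hO _ ResidueAtOK.Owns.classdata, fun q hq => hO _ (ResidueAtOK.Owns.row q hq), hrec.R8b⟩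

/-! ### R9 = H3: what vorbis_deinit walks -/

/-- **RES(n), the zero part** (CONTRACTS: "the 32 bytes of record i′ are 0" for `n ≤ i′ < residue_count`, from the memset of
line 4042). Stated through the ONE consequence that is used: `classdata` of such a record is NULL, so vorbis_deinit skips it.
`ResidueZeroFrom.of_bytes` gets it from the bytes. -/
def ResidueZeroFrom (mem : Mem) (f n : Nat) : Prop :=
  ∀ i : Nat, n ≤ i → (i : Int) < stb_vorbis.residue_count mem f →
    Residue.classdata mem (stb_vorbis.residue_config_at mem f i) = 0

/-- `k` zero bytes read as the number 0. -/
theorem _root_.X86.User.Mem.readLE_eq_zero_of_u8 (mem : Mem) (k : Nat) :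
    ∀ a : Nat, (∀ j, j < k → mem.u8 (a + j) = 0) → mem.readLE (addr a) k = 0 := by
  induction k with
  | zero =>
    intro a _
    rfl
  | succ k ih =>
    intro a h
    have h0 : mem.u8 a = 0 := h 0 (by omega)
    have ht : mem.readLE (addr (a + 1)) k = 0 := by
      apply ih (a + 1)
      intro j hj
      have := h (1 + j) (by omega)
      rw [← Nat.add_assoc] at this
      exact this
    unfold Mem.u8 at h0
    simp only [Mem.readLE] at h0
    simp only [Mem.readLE]
    rw [addr_add_lit, ht]
    omega

/-- Eight zero bytes read as the pointer 0. -/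
theorem _root_.X86.User.Mem.u64_eq_zero_of_u8 (mem : Mem) (a : Nat) (h : ∀ k, k < 8 → mem.u8 (a + k) = 0) : mem.u64 a = 0 :=
  mem.readLE_eq_zero_of_u8 8 a h

/-- After the memset of the `residue_config` block every record is all-zero, in particular `classdata = NULL`. -/
theorem ResidueZeroFrom.of_bytes {mem : Mem} {f n : Nat}
    (h : ∀ i : Nat, n ≤ i → (i : Int) < stb_vorbis.residue_count mem f → ∀ k, k < Off.sizeof.Residue →
      mem.u8 (stb_vorbis.residue_config_at mem f i + k) = 0) : ResidueZeroFrom mem f n := by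
  intro i hn hi
  simp only [Residue.classdata, Mem.ptr_eq, voff]
  apply Mem.u64_eq_zero_of_u8 mem
  intro k hk
  have := h i hn hi (16 + k) (by simp only [voff]; omega)
  rw [← Nat.add_assoc] at this
  exact this

/-- Fewer records. -/
theorem ResidueZeroFrom.mono {mem : Mem} {f n m : Nat} (h : ResidueZeroFrom mem f n) (hm : n ≤ m) : ResidueZeroFrom mem f m :=
  fun i hi hlt => h i (by omega) hlt

/-- **R9 (= H3), the deinit form** — holds at EVERY return of start_decoder: `residue_config = NULL`, or R2 and for every
record: `classdata = NULL`, or (R7 ∧ `codebooks ≠ NULL` ∧ `Block(classdata, 8·E)`). vorbis_deinit loads `classdata[j]`,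
`j < cb(classbook).entries`, and `residue_books` (a value it passes to the no-op `setup_free`, never dereferenced). The design's
"all bytes initialised" has no counterpart here: every byte of the flat memory has a value. -/
def ResidueDeinitOK (Blk : Block → Prop) (mem : Mem) (f : Nat) : Prop :=
  stb_vorbis.residue_config mem f = 0 ∨
    (Blk ⟨stb_vorbis.residue_config mem f, Off.sizeof.Residue * (stb_vorbis.residue_count mem f).toNat⟩ ∧
      ∀ i : Nat, (i : Int) < stb_vorbis.residue_count mem f →
        Residue.classdata mem (stb_vorbis.residue_config_at mem f i) = 0 ∨
          ((Residue.classbook mem (stb_vorbis.residue_config_at mem f i) : Int) < stb_vorbis.codebook_count mem f ∧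
            stb_vorbis.codebooks mem f ≠ 0 ∧
            Blk ⟨Residue.classdata mem (stb_vorbis.residue_config_at mem f i),
              8 * Residue.E mem f (stb_vorbis.residue_config_at mem f i)⟩))

/-- H0 / the exit 4041: `residue_config = NULL`. -/
theorem ResidueDeinitOK.of_null {Blk : Block → Prop} {mem : Mem} {f : Nat} (h : stb_vorbis.residue_config mem f = 0) :
    ResidueDeinitOK Blk mem f := Or.inl h

/-- **The error exits of the residue section** (start_decoder.R3–R7): records below `n` complete, record `n` being parsed
(`classdata` still NULL, or already allocated with R7 established), the records above it untouched. -/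
theorem ResidueUpTo.deinit {Blk : Block → Prop} {mem : Mem} {f n : Nat} (h : ResidueUpTo Blk mem f n)
    (hz : ResidueZeroFrom mem f (n + 1)) (hcb : stb_vorbis.codebooks mem f ≠ 0)
    (hcur : (n : Int) < stb_vorbis.residue_count mem f →
      Residue.classdata mem (stb_vorbis.residue_config_at mem f n) = 0 ∨
        ((Residue.classbook mem (stb_vorbis.residue_config_at mem f n) : Int) < stb_vorbis.codebook_count mem f ∧
          Blk ⟨Residue.classdata mem (stb_vorbis.residue_config_at mem f n),
            8 * Residue.E mem f (stb_vorbis.residue_config_at mem f n)⟩)) :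
    ResidueDeinitOK Blk mem f := by
  refine Or.inr ⟨h.R2, ?_⟩
  intro i hi
  by_cases h1 : i < n
  · have hrec := h.record i h1
    exact Or.inr ⟨hrec.R7, hcb, hrec.R8a⟩
  · by_cases h2 : i = n
    · subst h2
      cases hcur hi with
      | inl h0 => exact Or.inl h0
      | inr h3 => exact Or.inr ⟨h3.1, hcb, h3.2⟩
    · exact Or.inl (hz i (by omega) hi)

/-- The head of the residue loop and every exit after it (RALL): the deinit form. -/
theorem ResidueUpTo.deinit_head {Blk : Block → Prop} {mem : Mem} {f n : Nat} (h : ResidueUpTo Blk mem f n)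
    (hz : ResidueZeroFrom mem f n) (hcb : stb_vorbis.codebooks mem f ≠ 0) : ResidueDeinitOK Blk mem f := by
  apply h.deinit (hz.mono (by omega)) hcb
  intro hn
  exact Or.inl (hz n (by omega) hn)

/-- **`ResidueOK ⇒ R9`** (VorbisOK ⇒ DeinitOK, the residue part). -/
theorem ResidueOK.deinit {Blk : Block → Prop} {mem : Mem} {f : Nat} (h : ResidueOK Blk mem f)
    (hcb : stb_vorbis.codebooks mem f ≠ 0) : ResidueDeinitOK Blk mem f := by
  refine Or.inr ⟨h.R2, ?_⟩
  intro i hi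
  have hrec := h.record i hi
  exact Or.inr ⟨hrec.R7, hcb, hrec.R8a⟩

section deinit_use
variable {Live : Nat → Prop} {Blk : Block → Prop} {mem : Mem} {f : Nat}

/-- vorbis_deinit, `p->residue_config + i` after the NULL test: the record is inside the block. -/
theorem ResidueDeinitOK.site_record (hL : BlkLive Blk Live) (h : ResidueDeinitOK Blk mem f)
    (hne : stb_vorbis.residue_config mem f ≠ 0) {i : Nat} (hi : (i : Int) < stb_vorbis.residue_count mem f) (off n : Nat)
    (hoff : off + n ≤ Off.sizeof.Residue) (hn : 1 ≤ n) {a : Nat}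
    (ha : a = stb_vorbis.residue_config_at mem f i + off) : Site Live a n := by
  subst ha
  cases h with
  | inl h0 => exact absurd h0 hne
  | inr h1 =>
    apply Site.of_blk hL h1.1
    · simp only [vacc, voff]
      omega
    · simp only [vacc, voff] at hi hoff ⊢
      omega
    · exact hn

/-- vorbis_deinit, `r->classdata[j]` after the NULL test of `r->classdata`, `j < cb(classbook).entries`. -/
theorem ResidueDeinitOK.site_classdata (hL : BlkLive Blk Live) (h : ResidueDeinitOK Blk mem f)
    (hne : stb_vorbis.residue_config mem f ≠ 0) {i : Nat} (hi : (i : Int) < stb_vorbis.residue_count mem f)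
    (hcd : Residue.classdata mem (stb_vorbis.residue_config_at mem f i) ≠ 0) {j : Nat}
    (hj : j < Residue.E mem f (stb_vorbis.residue_config_at mem f i)) {a : Nat}
    (ha : a = Residue.classdata mem (stb_vorbis.residue_config_at mem f i) + 8 * j) : Site Live a 8 := by
  subst ha
  cases h with
  | inl h0 => exact absurd h0 hne
  | inr h1 =>
    cases h1.2 i hi with
    | inl h0 => exact absurd h0 hcd
    | inr h2 =>
      apply Site.of_blk hL h2.2.2
      · simp only []
        omega
      · simp only []
        omega
      · omega

/-- vorbis_deinit, `p->codebooks[r->classbook].entries`: R7 of the deinit form. -/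
theorem ResidueDeinitOK.classbook_lt (h : ResidueDeinitOK Blk mem f) (hne : stb_vorbis.residue_config mem f ≠ 0) {i : Nat}
    (hi : (i : Int) < stb_vorbis.residue_count mem f)
    (hcd : Residue.classdata mem (stb_vorbis.residue_config_at mem f i) ≠ 0) :
    (Residue.classbook mem (stb_vorbis.residue_config_at mem f i) : Int) < stb_vorbis.codebook_count mem f
      ∧ stb_vorbis.codebooks mem f ≠ 0 := by
  cases h with
  | inl h0 => exact absurd h0 hne
  | inr h1 =>
    cases h1.2 i hi with
    | inl h0 => exact absurd h0 hcd
    | inr h2 => exact ⟨h2.1, h2.2.1⟩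

end deinit_use

/-- **The blocks that R9 mentions**: `residue_config`, and `classdata` of every record. (Not every one of them is allocated:
`residue_config` or a `classdata` may be NULL. So there is no `owns_blk`; `hB` of `transfer` is asked only of those that are.) -/
inductive ResidueDeinitOK.Owns (mem : Mem) (f : Nat) : Block → Prop
  /-- `Block(residue_config, 32·residue_count)` -/
  | config : ResidueDeinitOK.Owns mem f
      ⟨stb_vorbis.residue_config mem f, Off.sizeof.Residue * (stb_vorbis.residue_count mem f).toNat⟩
  /-- `Block(classdata, 8·E)` of record `i` -/
  | classdata (i : Nat) (hi : (i : Int) < stb_vorbis.residue_count mem f) : ResidueDeinitOK.Owns mem f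
      ⟨Residue.classdata mem (stb_vorbis.residue_config_at mem f i),
        8 * Residue.E mem f (stb_vorbis.residue_config_at mem f i)⟩

/-- **The blocks whose CONTENT R9 reads**: the `residue_config` block when the pointer is not NULL (the fields `classdata`,
`classbook` of the records), CB0's codebooks block when `codebooks` is not NULL (`entries` of the class books). -/
inductive ResidueDeinitOK.Reads (mem : Mem) (f : Nat) : Block → Prop
  /-- the records -/
  | config (hne : stb_vorbis.residue_config mem f ≠ 0) : ResidueDeinitOK.Reads mem f
      ⟨stb_vorbis.residue_config mem f, Off.sizeof.Residue * (stb_vorbis.residue_count mem f).toNat⟩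
  /-- CB0's block -/
  | codebooks (hne : stb_vorbis.codebooks mem f ≠ 0) : ResidueDeinitOK.Reads mem f
      ⟨stb_vorbis.codebooks mem f, Off.sizeof.Codebook * (stb_vorbis.codebook_count mem f).toNat⟩

/-- Every block whose content R9 reads is allocated, given CB0's block when `codebooks ≠ NULL` (H1 of the codebook group). -/
theorem ResidueDeinitOK.reads_blk {Blk : Block → Prop} {mem : Mem} {f : Nat} {B : Block} (h : ResidueDeinitOK Blk mem f)
    (hcb : stb_vorbis.codebooks mem f ≠ 0 →
      Blk ⟨stb_vorbis.codebooks mem f, Off.sizeof.Codebook * (stb_vorbis.codebook_count mem f).toNat⟩)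
    (hR : ResidueDeinitOK.Reads mem f B) : Blk B := by
  cases hR with
  | config hne =>
    cases h with
    | inl h0 => exact absurd h0 hne
    | inr h1 => exact h1.1
  | codebooks hne => exact hcb hne

/-- **THE TWO-ADDRESS FRAME LEMMA OF R9** (windows: `ResidueOK.wins`). vorbis_deinit performs no store except pushes and
return addresses; every call it makes (`setup_free`) has an empty footprint outside the stack. It is called on the stack
object `&p` (the error exit of stb_vorbis_open_memory) and on the arena copy `f` (stb_vorbis_close). -/
theorem ResidueDeinitOK.transfer {Blk Blk' : Block → Prop} {mem mem' : Mem} {p f : Nat} (h : ResidueDeinitOK Blk mem p)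
    (he : ObjEq ResidueOK.wins mem p mem' f) (hk : ∀ B, ResidueDeinitOK.Reads mem p B → B.Kept mem mem')
    (hB : ∀ B, ResidueDeinitOK.Owns mem p B → Blk B → Blk' B) : ResidueDeinitOK Blk' mem' f := by
  have ecount : stb_vorbis.residue_count mem' f = stb_vorbis.residue_count mem p := by
    simp only [vacc, voff]
    exact he.i32 320 (by decide)
  have econf : stb_vorbis.residue_config mem' f = stb_vorbis.residue_config mem p := by
    simp only [vacc, voff]
    exact he.u64 456 (by decide)
  have ecbs : stb_vorbis.codebooks mem' f = stb_vorbis.codebooks mem p := by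
    simp only [vacc, voff]
    exact he.u64 168 (by decide)
  have eat : ∀ i, stb_vorbis.residue_config_at mem' f i = stb_vorbis.residue_config_at mem p i := by
    intro i
    unfold stb_vorbis.residue_config_at
    rw [econf]
  cases h with
  | inl h0 =>
    left
    rw [econf]
    exact h0
  | inr hr =>
    by_cases hne : stb_vorbis.residue_config mem p = 0
    · left
      rw [econf]
      exact hne
    · right
      have hconf := hk _ (ResidueDeinitOK.Reads.config hne)
      refine ⟨?_, ?_⟩
      · rw [econf, ecount]
        exact hB _ ResidueDeinitOK.Owns.config hr.1
      · intro i hi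
        rw [ecount] at hi
        rw [eat i]
        have hrk : (Block.mk (stb_vorbis.residue_config_at mem p i) Off.sizeof.Residue).Kept mem mem' := by
          apply hconf.mono
          · simp only [vacc, voff]
            omega
          · simp only [vacc, voff] at hi ⊢
            omega
        have ecd : Residue.classdata mem' (stb_vorbis.residue_config_at mem p i)
            = Residue.classdata mem (stb_vorbis.residue_config_at mem p i) := by
          simp only [Residue.classdata, Mem.ptr_eq, voff]
          exact hrk.u64 _ (by simp only []; omega) (by simp only [voff]; omega)
        cases hr.2 i hi with
        | inl h0 =>
          left
          rw [ecd]
          exact h0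
        | inr h2 =>
          right
          have h7 := h2.1
          have hcb := hk _ (ResidueDeinitOK.Reads.codebooks h2.2.1)
          have hcbk : (Block.mk (Residue.cbk mem p (stb_vorbis.residue_config_at mem p i)) 8).Kept mem mem' := by
            apply hcb.mono
            · simp only [vacc, voff]
              omega
            · simp only [vacc, voff] at h7 ⊢
              omega
          have hrd := ResidueReads.of_kept (he.sub (by decide)) hrk hcbk
          refine ⟨?_, ?_, ?_⟩
          · rw [hrd.classbook, hrd.codebook_count]
            exact h2.1
          · rw [ecbs]
            exact h2.2.1
          · rw [hrd.classdata, hrd.E]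
            exact hB _ (ResidueDeinitOK.Owns.classdata i hi) h2.2.2

/-- **FRAME of R9** (same address, same block predicate). -/
theorem ResidueDeinitOK.frame {Blk : Block → Prop} {mem mem' : Mem} {f : Nat} (h : ResidueDeinitOK Blk mem f)
    (hs : ObjSame f mem mem') (hk : ∀ B, ResidueDeinitOK.Reads mem f B → B.Kept mem mem') : ResidueDeinitOK Blk mem' f :=
  h.transfer (hs.sub (by decide)) hk (fun _ _ hb => hb)

/-! ### R8c under construction: the `j` / `k` loops of start_decoder.R5 -/

/-- A stored `residue_books` entry is `−1` or a codebook number. -/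
def BookOK (mem : Mem) (f : Nat) (b : Int) : Prop := b = -1 ∨ (0 ≤ b ∧ b < stb_vorbis.codebook_count mem f)

/-- **The invariant of loops 4064 / 4065**: every slot `[j'][k']` before `[j][k]` (row-major) holds `−1` or a codebook number. -/
def ResBooksUpTo (mem : Mem) (f r j k : Nat) : Prop :=
  ∀ j' k' : Nat, k' < 8 → (j' < j ∨ (j' = j ∧ k' < k)) → BookOK mem f (Residue.book mem r j' k')

/-- Before the loops. -/
theorem ResBooksUpTo.zero (mem : Mem) (f r : Nat) : ResBooksUpTo mem f r 0 0 := by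
  intro j' k' _ h
  omega

/-- The `k` loop is left (`k = 8`): the next row. -/
theorem ResBooksUpTo.next_row {mem : Mem} {f r j : Nat} (h : ResBooksUpTo mem f r j 8) : ResBooksUpTo mem f r (j + 1) 0 := by
  intro j' k' hk' hlt
  apply h j' k' hk'
  omega

/-- **One store** (either arm: the tested byte, or `−1`): the slots before `[j][k]` read as before, the new slot is good. -/
theorem ResBooksUpTo.step {mem mem' : Mem} {f r j k : Nat} (h : ResBooksUpTo mem f r j k)
    (hcount : stb_vorbis.codebook_count mem' f = stb_vorbis.codebook_count mem f)
    (hold : ∀ j' k' : Nat, k' < 8 → (j' < j ∨ (j' = j ∧ k' < k)) → Residue.book mem' r j' k' = Residue.book mem r j' k')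
    (hnew : BookOK mem' f (Residue.book mem' r j k)) : ResBooksUpTo mem' f r j (k + 1) := by
  intro j' k' hk' hlt
  by_cases e : j' = j ∧ k' = k
  · rw [e.1, e.2]
    exact hnew
  · have hlt' : j' < j ∨ (j' = j ∧ k' < k) := by omega
    have := h j' k' hk' hlt'
    unfold BookOK at this ⊢
    rw [hold j' k' hk' hlt', hcount]
    exact this

/-- **Nothing of the slots changed** (a `get_bits` call between two stores: it writes the bit state of `*f` only). -/
theorem ResBooksUpTo.keep {mem mem' : Mem} {f r j k : Nat} (h : ResBooksUpTo mem f r j k)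
    (hcount : stb_vorbis.codebook_count mem' f = stb_vorbis.codebook_count mem f)
    (hold : ∀ j' k' : Nat, k' < 8 → (j' < j ∨ (j' = j ∧ k' < k)) → Residue.book mem' r j' k' = Residue.book mem r j' k') :
    ResBooksUpTo mem' f r j k := by
  intro j' k' hk' hlt
  have := h j' k' hk' hlt
  unfold BookOK at this ⊢
  rw [hold j' k' hk' hlt, hcount]
  exact this

/-- The `j` loop is left (`j = classifications`): R8c. -/
theorem ResBooksUpTo.done {mem : Mem} {f r : Nat} (h : ResBooksUpTo mem f r (Residue.classifications mem r) 0) :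
    ∀ j k : Nat, j < Residue.classifications mem r → k < 8 →
      Residue.book mem r j k = -1 ∨ (0 ≤ Residue.book mem r j k ∧ Residue.book mem r j k < stb_vorbis.codebook_count mem f) :=
  fun j k hj hk => h j k hk (Or.inl hj)

/-- **The store of one slot leaves the other slots alone**: `mov [residue_books + 16j + 2k], ax` against slot `[j'][k']`. The
pointer `r->residue_books` is `rb` in both memories (the store does not hit the record: the blocks are disjoint). -/
theorem Residue.book_writeLE_other (mem : Mem) (r rb j k j' k' v : Nat)
    (hrb : Residue.residue_books mem r = rb) (hrb' : Residue.residue_books (mem.writeLE (addr (rb + 16 * j + 2 * k)) 2 v) r = rb)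
    (hk : k < 8) (hk' : k' < 8) (hne : ¬ (j' = j ∧ k' = k)) (htop : rb + 16 * j + 2 * k + 2 ≤ 2 ^ 64)
    (htop' : rb + 16 * j' + 2 * k' + 2 ≤ 2 ^ 64) :
    Residue.book (mem.writeLE (addr (rb + 16 * j + 2 * k)) 2 v) r j' k' = Residue.book mem r j' k' := by
  unfold Residue.book
  rw [hrb, hrb']
  have e : (addr (rb + 16 * j + 2 * k)).toNat = rb + 16 * j + 2 * k := toNat_addr _ (by omega)
  apply mem.i16_writeLE
  · omega
  · omega
  · omega

/-- **The slot just stored reads back** as the signed 16-bit value of what was stored. -/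
theorem Residue.book_writeLE_same (mem : Mem) (r rb j k v : Nat)
    (hrb' : Residue.residue_books (mem.writeLE (addr (rb + 16 * j + 2 * k)) 2 v) r = rb) :
    Residue.book (mem.writeLE (addr (rb + 16 * j + 2 * k)) 2 v) r j k = sint16 (v % 2 ^ 16) := by
  unfold Residue.book
  rw [hrb']
  exact mem.i16_writeLE_same _ v

/-- The `−1` arm: `mov WORD [slot], 0xffff`. -/
theorem BookOK.minus_one (mem : Mem) (f : Nat) : BookOK mem f (sint16 (0xffff % 2 ^ 16)) := by
  left
  decide

/-- The tested arm: a byte `v ≤ 255` with `v < codebook_count` (the signed compare `cmp ebp,[f+0xa0] ; jge error`). -/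
theorem BookOK.of_byte (mem : Mem) (f v : Nat) (hv : v < 256) (hlt : (v : Int) < stb_vorbis.codebook_count mem f) :
    BookOK mem f (sint16 (v % 2 ^ 16)) := by
  right
  have e : v % 2 ^ 16 = v := Nat.mod_eq_of_lt (by omega)
  rw [e]
  have := sint16_cases v
  omega

/-! ### R8a / R8b under construction: the loops 4079 / 4084 of start_decoder.R7 -/

/-- **The invariant of loop 4079** (`for (j=0; j < entries; ++j)`), without the `Block(classdata, 8E)` part (that is R8a,
already there): the rows below `j` are blocks of `W` bytes whose bytes are class numbers. -/
structure RowsUpTo (Blk : Block → Prop) (mem : Mem) (f r j : Nat) : Prop where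
  rows : ∀ q : Nat, q < j → Blk ⟨Residue.row mem r q, Residue.W mem f r⟩
  bytes : ∀ q k : Nat, q < j → k < Residue.W mem f r → mem.u8 (Residue.row mem r q + k) < Residue.classifications mem r

/-- **The invariant of loop 4084** (`for (k=classwords-1; k >= 0; --k)`): the bytes `k' ≥ k` of row `j` are class numbers.
`k = W` before the loop, `k = 0` after it. -/
def RowBytesFrom (mem : Mem) (f r j k : Nat) : Prop :=
  ∀ k' : Nat, k ≤ k' → k' < Residue.W mem f r → mem.u8 (Residue.row mem r j + k') < Residue.classifications mem r

/-- Before loop 4079. -/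
theorem RowsUpTo.zero (Blk : Block → Prop) (mem : Mem) (f r : Nat) : RowsUpTo Blk mem f r 0 :=
  ⟨fun q hq => by omega, fun q k hq _ => by omega⟩

/-- **The complete rows are kept** (over `setup_malloc` of the next row, `get_bits`, the stores into the row being filled): what
the record reads is the same (`ResidueReads`: the decoder object at `p` before, at `f` after; in start_decoder `p = f`), the
`classdata` table reads the same below `j`, the rows below `j` are kept and still allocated. -/
theorem RowsUpTo.frame {Blk Blk' : Block → Prop} {mem mem' : Mem} {p f r j : Nat} (h : RowsUpTo Blk mem p r j)
    (hrd : ResidueReads mem p mem' f r)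
    (hptr : ∀ q : Nat, q < j → Residue.row mem' r q = Residue.row mem r q)
    (hrows : ∀ q : Nat, q < j → Blk' ⟨Residue.row mem r q, Residue.W mem p r⟩ ∧
      (Block.mk (Residue.row mem r q) (Residue.W mem p r)).Kept mem mem') : RowsUpTo Blk' mem' f r j := by
  constructor
  · intro q hq
    rw [hptr q hq, hrd.W]
    exact (hrows q hq).1
  · intro q k hq hk
    rw [hrd.W] at hk
    rw [hptr q hq, hrd.classifications, (hrows q hq).2.u8 _ (by simp only []; omega) (by simp only []; omega)]
    exact h.bytes q k hq hk

/-- Before loop 4084 (`k = classwords − 1` still to be stored: nothing is claimed). -/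
theorem RowBytesFrom.init (mem : Mem) (f r j : Nat) : RowBytesFrom mem f r j (Residue.W mem f r) := by
  intro k' h1 h2
  omega

/-- One store of loop 4084 at `k − 1` (over an abstract new memory): the bytes above are unchanged, the new one is a class
number (`temp % classifications`, `Res.class_digit_lt`), the reads of the record are unchanged. -/
theorem RowBytesFrom.step {mem mem' : Mem} {f r j k : Nat} (h : RowBytesFrom mem f r j (k + 1))
    (hW : Residue.W mem' f r = Residue.W mem f r) (hcls : Residue.classifications mem' r = Residue.classifications mem r)
    (hrow : Residue.row mem' r j = Residue.row mem r j)
    (hold : ∀ k', k + 1 ≤ k' → k' < Residue.W mem f r → mem'.u8 (Residue.row mem r j + k') = mem.u8 (Residue.row mem r j + k'))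
    (hnew : mem'.u8 (Residue.row mem r j + k) < Residue.classifications mem r) : RowBytesFrom mem' f r j k := by
  intro k' h1 h2
  rw [hW] at h2
  rw [hrow, hcls]
  by_cases e : k' = k
  · rw [e]
    exact hnew
  · rw [hold k' (by omega) h2]
    exact h k' (by omega) h2

/-- Loop 4084 is left, `++j`: one more complete row. -/
theorem RowsUpTo.succ {Blk : Block → Prop} {mem : Mem} {f r j : Nat} (h : RowsUpTo Blk mem f r j)
    (hrow : Blk ⟨Residue.row mem r j, Residue.W mem f r⟩) (hb : RowBytesFrom mem f r j 0) : RowsUpTo Blk mem f r (j + 1) := by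
  constructor
  · intro q hq
    by_cases e : q = j
    · rw [e]
      exact hrow
    · exact h.rows q (by omega)
  · intro q k hq hk
    by_cases e : q = j
    · rw [e]
      exact hb k (by omega) hk
    · exact h.bytes q k (by omega) hk

/-- Loop 4079 is left (`j = E`): the second half of R8a, and R8b. -/
theorem RowsUpTo.done {Blk : Block → Prop} {mem : Mem} {f r : Nat} (h : RowsUpTo Blk mem f r (Residue.E mem f r)) :
    (∀ q : Nat, q < Residue.E mem f r → Blk ⟨Residue.row mem r q, Residue.W mem f r⟩) ∧
      (∀ q k : Nat, q < Residue.E mem f r → k < Residue.W mem f r →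
        mem.u8 (Residue.row mem r q + k) < Residue.classifications mem r) :=
  ⟨h.rows, h.bytes⟩

/-- The digit stored: `temp % classifications < classifications` (R6: the divisor is ≥ 1; `temp ≥ 0` is kept by `temp /=`). -/
theorem Res.class_digit_lt (temp cls : Nat) (hcls : 1 ≤ cls) : temp % cls < cls := Nat.mod_lt temp (by omega)

/-- `temp /= classifications` keeps `0 ≤ temp ≤ j`. -/
theorem Res.class_div_le (temp cls : Nat) : temp / cls ≤ temp := Nat.div_le_self temp cls

/-- **Assembling one record** at the end of start_decoder.R7: the field clauses established by R3, the blocks by R4 / R6, the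
CONTENT by the loops of R5 / R7. -/
theorem ResidueAtOK.assemble {Blk : Block → Prop} {mem : Mem} {f r : Nat}
    (h4 : Residue.begin mem r ≤ Residue.end_ mem r ∧ Residue.end_ mem r < 2 ^ 24)
    (h5 : 1 ≤ Residue.part_size mem r ∧ Residue.part_size mem r ≤ 2 ^ 24)
    (h6 : 1 ≤ Residue.classifications mem r ∧ Residue.classifications mem r ≤ 64)
    (h7 : (Residue.classbook mem r : Int) < stb_vorbis.codebook_count mem f) (h7b : 1 ≤ Residue.W mem f r)
    (h8 : Blk ⟨Residue.residue_books mem r, 16 * Residue.classifications mem r⟩)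
    (hbooks : ResBooksUpTo mem f r (Residue.classifications mem r) 0)
    (h8a : Blk ⟨Residue.classdata mem r, 8 * Residue.E mem f r⟩) (hrows : RowsUpTo Blk mem f r (Residue.E mem f r)) :
    ResidueAtOK Blk mem f r :=
  ⟨h4, h5, h6, h7, h7b, h8, hbooks.done, h8a, hrows.rows, hrows.bytes⟩

end Vorbis
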